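-- pv_equiv track=rewrite | github.com/xobivan/exercise-sheet-5 | solution.py | theMostExpensiveGift
-- ===== SOURCE A (Python) =====
-- def theMostExpensiveGift(gifts, customers):
--     res = [None]*len(customers)
--     sold = [False]*len(gifts)
--     for i in range(len(customers)):
--         idx = binarySearchClosest(customers[i], gifts)
--         while idx >= 0 and sold[idx]:
--             idx-=1
--         if idx >= 0:
--             sold[idx] = True
--             res[i] = gifts[idx]
--         else:
--             res[i] = 0
--     return res
--
-- def binarySearchClosest(target, gifts):
--     left = 0
--     right = len(gifts) - 1
--     ans = -1
--
--     while left <= right: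
--         mid = (left + right) // 2
--
--         if gifts[mid] <= target:
--             ans = mid
--             left = mid + 1
--         else:
--             right = mid - 1
--
--     return ans
-- ===== SOURCE B (Python) =====
-- def theMostExpensiveGift(gifts, customers):
--     # Sorted list of indices of gifts still for sale; a binary search on it
--     # replaces A's linear walk over the sold[] flags.
--     free = list(range(len(gifts)))
--     res = []
--     for budget in customers:
--         idx = binarySearchClosest(budget, gifts)
--         lo, hi = 0, len(free)
--         while lo < hi:
--             mid = (lo + hi) // 2
--             if free[mid] <= idx:
--                 lo = mid + 1
--             else:
--                 hi = mid
--         if lo: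
--             res.append(gifts[free.pop(lo - 1)])
--         else:
--             res.append(0)
--     return res
--
-- def binarySearchClosest(target, gifts):
--     left = 0
--     right = len(gifts) - 1
--     ans = -1
--
--     while left <= right:
--         mid = (left + right) // 2
--
--         if gifts[mid] <= target:
--             ans = mid
--             left = mid + 1
--         else:
--             right = mid - 1
--
--     return ans
-- ===== Notes on version B (the rewrite author's own statement) =====
-- stated objective: faster
-- what changed: B keeps a sorted list of still-unsold gift indices and finds each customer's gift by a binary search on that list (popping the chosen index), instead of A's per-customer linear downward walk over a sold[] flag array.
import Mathlib
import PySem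

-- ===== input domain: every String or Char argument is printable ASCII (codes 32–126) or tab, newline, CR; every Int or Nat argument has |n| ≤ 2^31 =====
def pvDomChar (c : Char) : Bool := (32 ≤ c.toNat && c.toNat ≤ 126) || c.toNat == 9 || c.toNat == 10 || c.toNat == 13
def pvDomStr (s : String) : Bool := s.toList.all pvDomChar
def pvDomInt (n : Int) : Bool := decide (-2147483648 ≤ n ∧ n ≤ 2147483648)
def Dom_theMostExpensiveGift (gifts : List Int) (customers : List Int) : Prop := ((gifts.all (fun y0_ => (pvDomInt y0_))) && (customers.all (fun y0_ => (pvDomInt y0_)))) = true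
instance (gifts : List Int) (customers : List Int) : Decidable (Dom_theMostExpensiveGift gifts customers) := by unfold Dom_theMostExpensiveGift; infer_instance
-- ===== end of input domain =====

-- B replaces A's per-customer linear downward walk over sold[] flags by a binary
-- search on a sorted list of still-available gift indices (measured faster by the
-- timing run).

-- ===== PORT A =====

-- the 'while left <= right' loop of binarySearchClosest (fuel only bounds the
-- iteration count for totality; gifts.length + 1 always suffices)
def pvBsLoop (target : Int) (gifts : List Int) : Nat → Int → Int → Int → Int
  | 0, _, _, ans => ans
  | fuel + 1, left, right, ans =>
    if left ≤ right then
      let mid := PySem.Int.floordiv (left + right) 2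
      match PySem.List.pyGet? gifts mid with
      | some g =>
          if g ≤ target then pvBsLoop target gifts fuel (mid + 1) right mid
          else pvBsLoop target gifts fuel left (mid - 1) ans
      | none => ans   -- IndexError in Python; unreachable: 0 ≤ left ≤ mid ≤ right < len always
    else ans

def binarySearchClosest (target : Int) (gifts : List Int) : Int :=
  pvBsLoop target gifts (gifts.length + 1) 0 (gifts.length - 1) (-1)

-- the 'while idx >= 0 and sold[idx]' loop (fuel sold.length + 1 suffices)
def pvWalk (sold : List Bool) : Nat → Int → Int
  | 0, idx => idx
  | fuel + 1, idx =>
    if idx ≥ 0 ∧ (PySem.List.pyGet? sold idx).getD false = true then pvWalk sold fuel (idx - 1)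
    else idx

-- the 'for i in range(len(customers))' loop, carrying sold[] and emitting res in order
def pvAMain (gifts : List Int) (cs : List Int) (sold : List Bool) : List Int :=
  match cs with
  | [] => []
  | c :: rest =>
    let idx := pvWalk sold (sold.length + 1) (binarySearchClosest c gifts)
    if idx ≥ 0 then
      ((PySem.List.pyGet? gifts idx).getD 0) :: pvAMain gifts rest (PySem.List.pySetD sold idx true)
    else
      0 :: pvAMain gifts rest sold

def theMostExpensiveGift (gifts : List Int) (customers : List Int) : List Int :=
  pvAMain gifts customers (List.replicate gifts.length false)

-- ===== PORT B =====

-- B's 'while lo < hi' binary search on the free-index list (fuel free.length + 1 suffices)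
def pvPosLoop (free : List Int) (idx : Int) : Nat → Int → Int → Int
  | 0, lo, _ => lo
  | fuel + 1, lo, hi =>
    if lo < hi then
      let mid := PySem.Int.floordiv (lo + hi) 2
      if (PySem.List.pyGet? free mid).getD 0 ≤ idx then pvPosLoop free idx fuel (mid + 1) hi
      else pvPosLoop free idx fuel lo mid
    else lo

-- B's 'for budget in customers' loop, carrying the sorted free-index list
def pvBMain (gifts : List Int) (cs : List Int) (free : List Int) : List Int :=
  match cs with
  | [] => []
  | c :: rest =>
    let idx := binarySearchClosest c gifts
    let lo := pvPosLoop free idx (free.length + 1) 0 free.length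
    if lo ≠ 0 then
      match PySem.List.pop? free (lo - 1) with
      | some (j, free') => ((PySem.List.pyGet? gifts j).getD 0) :: pvBMain gifts rest free'
      | none => []   -- IndexError in Python; unreachable: 0 < lo ≤ len free always
    else
      0 :: pvBMain gifts rest free

def theMostExpensiveGift_alt (gifts : List Int) (customers : List Int) : List Int :=
  pvBMain gifts customers (PySem.List.pyRange 0 gifts.length 1)

-- ===== PRECONDITION & SPEC =====
def Spec_theMostExpensiveGift (gifts : List Int) (customers : List Int) (out : List Int) : Prop := out = theMostExpensiveGift_alt gifts customers
instance (gifts : List Int) (customers : List Int) (out : List Int) : Decidable (Spec_theMostExpensiveGift gifts customers out) := by unfold Spec_theMostExpensiveGift; infer_instance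

-- ===== CLAIM (what is proved, stated in full; the proofs are below) =====
def Claim_equal_theMostExpensiveGift : Prop := ∀ (gifts : List Int) (customers : List Int), Dom_theMostExpensiveGift gifts customers → Spec_theMostExpensiveGift gifts customers (theMostExpensiveGift gifts customers)

-- ===== LEMMAS AND PROOFS =====

-- the sorted list of indices of still-unsold gifts, read off A's sold[] flags
def unsolds (sold : List Bool) : List Int :=
  (List.range sold.length).filterMap (fun k => if sold.getD k true then none else some (k : Int))

lemma mem_unsolds {sold : List Bool} {i : Int} (h : i ∈ unsolds sold) :
    0 ≤ i ∧ i.toNat < sold.length ∧ sold.getD i.toNat true = false := by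
  unfold unsolds at h
  rcases List.mem_filterMap.mp h with ⟨k, hk, hfk⟩
  have hk' : k < sold.length := List.mem_range.mp hk
  by_cases hs : sold.getD k true = true
  · rw [if_pos hs] at hfk; cases hfk
  · rw [if_neg hs] at hfk
    have hik := Option.some.inj hfk
    subst hik
    simp only [Int.toNat_natCast]
    exact ⟨Int.natCast_nonneg k, hk', Bool.not_eq_true _ ▸ hs⟩

lemma mem_unsolds_of {sold : List Bool} {k : Nat} (hk : k < sold.length)
    (hs : sold.getD k true = false) : (k : Int) ∈ unsolds sold := by
  unfold unsolds
  exact List.mem_filterMap.mpr ⟨k, List.mem_range.mpr hk, by rw [if_neg (by rw [hs]; exact Bool.false_ne_true)]⟩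

lemma unsolds_sorted (sold : List Bool) : (unsolds sold).Pairwise (· < ·) := by
  unfold unsolds
  refine List.Pairwise.filterMap _ ?_ List.pairwise_lt_range
  intro a a' hlt b hb b' hb'
  by_cases h1 : sold.getD a true = true
  · rw [if_pos h1] at hb; cases hb
  · by_cases h2 : sold.getD a' true = true
    · rw [if_pos h2] at hb'; cases hb'
    · rw [if_neg h1] at hb
      rw [if_neg h2] at hb'
      have := Option.some.inj hb
      have := Option.some.inj hb'
      omega

lemma unsolds_replicate (n : Nat) :
    unsolds (List.replicate n false) = PySem.List.pyRange 0 (n : Int) 1 := by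
  unfold unsolds
  rw [List.length_replicate]
  have h1 : ∀ k ∈ List.range n,
      (if (List.replicate n false).getD k true = true then none else some (k : Int)) =
        some (k : Int) := by
    intro k hk
    rw [if_neg (by rw [List.getD_replicate false (List.mem_range.mp hk)]; exact Bool.false_ne_true)]
  rw [List.filterMap_congr h1, PySem.List.pyRange_one]
  simp

-- the filtered prefix of elements ≤ idx, characterised by a position bound
lemma filter_le_take {idx : Int} : ∀ (l : List Int) (r : Nat), r ≤ l.length →
    (∀ (k : Nat) (h : k < l.length), k < r → l[k] ≤ idx) →
    (∀ (k : Nat) (h : k < l.length), r ≤ k → idx < l[k]) →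
    l.filter (fun e => decide (e ≤ idx)) = l.take r := by
  intro l
  induction l with
  | nil => intro r _ _ _; simp
  | cons x xs ih =>
    intro r hr hb ha
    cases r with
    | zero =>
      have hx : idx < x := ha 0 (by simp) (by omega)
      rw [List.filter_cons_of_neg (by simp; omega), List.take_zero]
      exact ih 0 (by omega) (fun k h hk => by omega)
        (fun k h _ => by simpa using ha (k + 1) (by simpa using h) (by omega))
    | succ s =>
      have hx : x ≤ idx := hb 0 (by simp) (by omega)
      rw [List.filter_cons_of_pos (by simpa using hx), List.take_succ_cons]
      rw [ih s (by simpa using hr)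
        (fun k h hk => by simpa using hb (k + 1) (by simpa using h) (by omega))
        (fun k h hk => by simpa using ha (k + 1) (by simpa using h) (by omega))]

-- in a strictly increasing list the elements ≤ idx are an initial segment
lemma sorted_filter_take {l : List Int} (hs : l.Pairwise (· < ·)) (idx : Int) :
    l.filter (fun e => decide (e ≤ idx)) =
      l.take (l.filter (fun e => decide (e ≤ idx))).length := by
  induction l with
  | nil => simp
  | cons x xs ih =>
    rcases List.pairwise_cons.mp hs with ⟨hx, hs'⟩
    by_cases hxi : x ≤ idx
    · rw [List.filter_cons_of_pos (by simpa using hxi)]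
      simp only [List.length_cons, List.take_succ_cons]
      rw [← ih hs']
    · have hnil : xs.filter (fun e => decide (e ≤ idx)) = [] :=
        List.filter_eq_nil_iff.mpr (fun e he => by have := hx e he; simp; omega)
      rw [List.filter_cons_of_neg (by simpa using hxi), hnil]
      simp

lemma sorted_getLast_filter : ∀ {l : List Int}, l.Pairwise (· < ·) → ∀ {a : Int}, a ∈ l →
    (l.filter (fun e => decide (e ≤ a))).getLast? = some a := by
  intro l
  induction l with
  | nil => intro _ a ha; cases ha
  | cons x xs ih =>
    intro hs a ha
    rcases List.pairwise_cons.mp hs with ⟨hx, hs'⟩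
    rcases List.mem_cons.mp ha with rfl | ha'
    · have hnil : xs.filter (fun e => decide (e ≤ a)) = [] :=
        List.filter_eq_nil_iff.mpr (fun e he => by have := hx e he; simp; omega)
      rw [List.filter_cons_of_pos (by simp), hnil]
      rfl
    · have hxa : x < a := hx a ha'
      have hne : xs.filter (fun e => decide (e ≤ a)) ≠ [] := by
        intro h
        have := List.filter_eq_nil_iff.mp h a ha'
        simp at this
      rw [List.filter_cons_of_pos (by simp; omega)]
      rcases hlf : xs.filter (fun e => decide (e ≤ a)) with _ | ⟨y, ys⟩
      · exact absurd hlf hne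
      · rw [List.getLast?_cons_cons, ← hlf, ih hs' ha']

lemma sorted_filter_ne_eraseIdx : ∀ {l : List Int}, l.Pairwise (· < ·) →
    ∀ (k : Nat) (hk : k < l.length),
    l.filter (fun e => decide (e ≠ l[k])) = l.eraseIdx k := by
  intro l
  induction l with
  | nil => intro _ k hk; simp at hk
  | cons x xs ih =>
    intro hs k hk
    rcases List.pairwise_cons.mp hs with ⟨hx, hs'⟩
    cases k with
    | zero =>
      rw [List.eraseIdx_cons_zero, List.getElem_cons_zero,
        List.filter_cons_of_neg (by simp)]
      exact List.filter_eq_self.mpr (fun e he => by have := hx e he; simp; omega)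
    | succ s =>
      have hs' : s < xs.length := by simpa using hk
      have hxl : x < xs[s] := hx _ (List.getElem_mem hs')
      rw [List.eraseIdx_cons_succ, List.getElem_cons_succ,
        List.filter_cons_of_pos (by simp; omega), ih (List.pairwise_cons.mp hs).2 s hs']

lemma unsolds_set (sold : List Bool) (j : Nat) (hj : j < sold.length) :
    unsolds (sold.set j true) = (unsolds sold).filter (fun e => decide (e ≠ (j : Int))) := by
  unfold unsolds
  rw [List.length_set, List.filter_filterMap]
  apply List.filterMap_congr
  intro k hk
  have hk' : k < sold.length := List.mem_range.mp hk
  have hset : (sold.set j true).getD k true = if k = j then true else sold.getD k true := by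
    by_cases he : k = j
    · subst he
      rw [if_pos rfl, List.getD_eq_getElem _ _ (by simpa using hk'), List.getElem_set_self]
    · rw [if_neg he, List.getD_eq_getElem _ _ (by simpa using hk'),
        List.getElem_set_ne (fun h => he h.symm), ← List.getD_eq_getElem sold true hk']
  rw [hset]
  by_cases he : k = j
  · subst he
    rw [if_pos rfl, if_pos rfl]
    by_cases hsk : sold.getD k true = true
    · rw [if_pos hsk]; rfl
    · rw [if_neg hsk]; simp [Option.filter]
  · rw [if_neg he]
    by_cases hsk : sold.getD k true = true
    · rw [if_pos hsk]; rfl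
    · rw [if_neg hsk]
      have hne : (k : Int) ≠ (j : Int) := by omega
      simp [Option.filter, hne]

-- bounds of A's binary search: the answer is always in [-1, len)
lemma bsLoop_bounds (t : Int) (gifts : List Int) :
    ∀ (fuel : Nat) (left right ans : Int),
    0 ≤ left → right ≤ (gifts.length : Int) - 1 → -1 ≤ ans → ans < (gifts.length : Int) →
    -1 ≤ pvBsLoop t gifts fuel left right ans ∧
      pvBsLoop t gifts fuel left right ans < (gifts.length : Int) := by
  intro fuel
  induction fuel with
  | zero => intro left right ans _ _ h3 h4; exact ⟨h3, h4⟩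
  | succ fuel ih =>
    intro left right ans h1 h2 h3 h4
    by_cases hlr : left ≤ right
    · have hm := PySem.Int.floordiv_two_mid_bounds (lo := left) (hi := right) hlr
      simp only [pvBsLoop, if_pos hlr]
      cases hget : PySem.List.pyGet? gifts (PySem.Int.floordiv (left + right) 2) with
      | none => exact ⟨h3, h4⟩
      | some g =>
        by_cases hle : g ≤ t
        · simp only [if_pos hle]
          exact ih _ _ _ (by omega) (by omega) (by omega) (by omega)
        · simp only [if_neg hle]
          exact ih _ _ _ h1 (by omega) h3 h4
    · simp only [pvBsLoop, if_neg hlr]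
      exact ⟨h3, h4⟩

-- A's downward walk lands on the last still-unsold index ≤ idx (or -1)
lemma walk_eq (sold : List Bool) :
    ∀ (fuel : Nat) (idx : Int), -1 ≤ idx → idx < (sold.length : Int) → idx < (fuel : Int) →
    pvWalk sold fuel idx = ((unsolds sold).filter (fun e => decide (e ≤ idx))).getLastD (-1) := by
  intro fuel
  induction fuel with
  | zero =>
    intro idx h1 h2 hf
    have hidx : idx = -1 := by omega
    have hnil : (unsolds sold).filter (fun e => decide (e ≤ idx)) = [] :=
      List.filter_eq_nil_iff.mpr (fun e he => by
        have := (mem_unsolds he).1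
        simp
        omega)
    rw [hnil, hidx]
    rfl
  | succ fuel ih =>
    intro idx h1 h2 hf
    by_cases hcond : idx ≥ 0 ∧ (PySem.List.pyGet? sold idx).getD false = true
    · simp only [pvWalk, if_pos hcond]
      rw [ih (idx - 1) (by omega) (by omega) (by omega)]
      rcases hcond with ⟨hge, hsold⟩
      have hlt : idx.toNat < sold.length := by omega
      have hsold' : sold.getD idx.toNat true = true := by
        rw [PySem.List.pyGet?_of_nonneg _ hge, List.getElem?_eq_getElem hlt,
          Option.getD_some] at hsold
        rwa [List.getD_eq_getElem sold true hlt]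
      congr 1
      apply List.filter_congr
      intro x hx
      have hm := mem_unsolds hx
      have hxne : x ≠ idx := by
        intro he
        rw [he] at hm
        rw [hm.2.2] at hsold'
        exact Bool.false_ne_true hsold'
      simp only [decide_eq_decide]
      omega
    · simp only [pvWalk, if_neg hcond]
      by_cases hge : 0 ≤ idx
      · have hsold : (PySem.List.pyGet? sold idx).getD false ≠ true := fun h => hcond ⟨hge, h⟩
        have hlt : idx.toNat < sold.length := by omega
        have hsold' : sold.getD idx.toNat true = false := by
          rw [PySem.List.pyGet?_of_nonneg _ hge, List.getElem?_eq_getElem hlt,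
            Option.getD_some] at hsold
          rw [List.getD_eq_getElem sold true hlt]
          exact Bool.not_eq_true _ ▸ (by simpa using hsold)
        have hmem : idx ∈ unsolds sold := by
          have := mem_unsolds_of hlt hsold'
          rwa [Int.toNat_of_nonneg hge] at this
        rw [List.getLastD_eq_getLast?, sorted_getLast_filter (unsolds_sorted sold) hmem]
        rfl
      · have hidx : idx = -1 := by omega
        have hnil : (unsolds sold).filter (fun e => decide (e ≤ idx)) = [] :=
          List.filter_eq_nil_iff.mpr (fun e he => by
            have := (mem_unsolds he).1
            simp
            omega)
        rw [hnil, hidx]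
        rfl

-- B's binary search returns the number of free indices ≤ idx
lemma posLoop_spec (free : List Int) (idx : Int) :
    ∀ (fuel : Nat) (lo hi : Int),
    free.Pairwise (· < ·) → 0 ≤ lo → lo ≤ hi → hi ≤ (free.length : Int) →
    (hi - lo).toNat < fuel →
    (∀ (k : Nat) (h : k < free.length), (k : Int) < lo → free[k] ≤ idx) →
    (∀ (k : Nat) (h : k < free.length), hi ≤ (k : Int) → idx < free[k]) →
    pvPosLoop free idx fuel lo hi = ((free.filter (fun e => decide (e ≤ idx))).length : Int) := by
  intro fuel
  induction fuel with
  | zero => intro lo hi _ _ _ _ hf _ _; omega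
  | succ fuel ih =>
    intro lo hi hsort h0 hlohi hhi hf hb ha
    by_cases hlh : lo < hi
    · have hm := PySem.Int.floordiv_two_mid_bounds (lo := lo) (hi := hi) (le_of_lt hlh)
      have hmhi : PySem.Int.floordiv (lo + hi) 2 < hi :=
        (PySem.Int.floordiv_lt_iff_lt_mul (by omega)).mpr (by omega)
      have hmlt : (PySem.Int.floordiv (lo + hi) 2).toNat < free.length := by omega
      have hget : (PySem.List.pyGet? free (PySem.Int.floordiv (lo + hi) 2)).getD 0 =
          free[(PySem.Int.floordiv (lo + hi) 2).toNat] := by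
        rw [PySem.List.pyGet?_of_nonneg _ (by omega), List.getElem?_eq_getElem hmlt,
          Option.getD_some]
      simp only [pvPosLoop, if_pos hlh]
      by_cases hle : (PySem.List.pyGet? free (PySem.Int.floordiv (lo + hi) 2)).getD 0 ≤ idx
      · rw [if_pos hle]
        apply ih _ _ hsort (by omega) (by omega) hhi (by omega)
        · intro k h hk
          rw [hget] at hle
          rcases Nat.lt_or_ge k (PySem.Int.floordiv (lo + hi) 2).toNat with hkm | hkm
          · exact le_trans
              (le_of_lt (List.pairwise_iff_getElem.mp hsort k _ h hmlt hkm)) hle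
          · have : k = (PySem.Int.floordiv (lo + hi) 2).toNat := by omega
            subst this
            exact hle
        · exact ha
      · rw [if_neg hle]
        apply ih _ _ hsort h0 (by omega) (by omega) (by omega) hb
        intro k h hk
        rw [hget] at hle
        have hle' : idx < free[(PySem.Int.floordiv (lo + hi) 2).toNat] := by omega
        rcases Nat.lt_or_ge (PySem.Int.floordiv (lo + hi) 2).toNat k with hkm | hkm
        · exact lt_trans hle' (List.pairwise_iff_getElem.mp hsort _ k hmlt h hkm)
        · have : k = (PySem.Int.floordiv (lo + hi) 2).toNat := by omega
          subst this
          exact hle'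
    · simp only [pvPosLoop, if_neg hlh]
      have hlo : lo = hi := by omega
      have heq : free.filter (fun e => decide (e ≤ idx)) = free.take lo.toNat := by
        apply filter_le_take free lo.toNat (by omega)
        · intro k h hk; exact hb k h (by omega)
        · intro k h hk; exact ha k h (by omega)
      rw [heq, List.length_take]
      omega

-- the main loop invariant: B's free list is exactly the list of unsold indices
lemma main_loop (gifts : List Int) : ∀ (cs : List Int) (sold : List Bool),
    sold.length = gifts.length →
    pvAMain gifts cs sold = pvBMain gifts cs (unsolds sold) := by
  intro cs
  induction cs with
  | nil => intro sold _; rfl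
  | cons c rest ih =>
    intro sold hlen
    have hbs : -1 ≤ binarySearchClosest c gifts ∧
        binarySearchClosest c gifts < (gifts.length : Int) := by
      unfold binarySearchClosest
      exact bsLoop_bounds c gifts (gifts.length + 1) 0 ((gifts.length : Int) - 1) (-1)
        (by omega) (by omega) (by omega) (by omega)
    have hsort := unsolds_sorted sold
    set idx := binarySearchClosest c gifts with hidxdef
    set free := unsolds sold with hfreedef
    set c0 := (free.filter (fun e => decide (e ≤ idx))).length with hc0def
    have hpos : pvPosLoop free idx (free.length + 1) 0 (free.length : Int) = (c0 : Int) := by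
      apply posLoop_spec free idx (free.length + 1) 0 (free.length : Int) hsort (by omega)
        (by omega) (by omega) (by omega)
      · intro k h hk; omega
      · intro k h hk; omega
    have hwalk : pvWalk sold (sold.length + 1) idx =
        (free.filter (fun e => decide (e ≤ idx))).getLastD (-1) :=
      walk_eq sold (sold.length + 1) idx hbs.1 (by omega) (by push_cast; omega)
    have htake := sorted_filter_take hsort idx
    rw [← hc0def] at htake
    have hc0le : c0 ≤ free.length := by
      have := congrArg List.length htake
      rw [List.length_take] at this
      omega
    simp only [pvAMain, pvBMain, ← hidxdef, hpos, hwalk]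
    by_cases hc : c0 = 0
    · have hnil : free.filter (fun e => decide (e ≤ idx)) = [] :=
        List.length_eq_zero_iff.mp (hc0def ▸ hc)
      rw [hnil]
      rw [if_neg (by simp [List.getLastD] : ¬ ((List.getLastD ([] : List Int) (-1)) ≥ 0)),
        if_neg (by omega : ¬ ((c0 : Int) ≠ 0))]
      rw [ih sold hlen]
    · have hc1 : c0 - 1 < free.length := by omega
      have hlast : (free.filter (fun e => decide (e ≤ idx))).getLast? = some free[c0 - 1] := by
        rw [List.getLast?_eq_getElem?, ← hc0def, htake, List.getElem?_take]
        rw [if_pos (by omega), List.getElem?_eq_getElem hc1]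
      set j := free[c0 - 1] with hjdef
      have hjmem : j ∈ free := List.getElem_mem hc1
      rw [hfreedef] at hjmem
      have hjm := mem_unsolds hjmem
      have hlastD : (free.filter (fun e => decide (e ≤ idx))).getLastD (-1) = j := by
        rw [List.getLastD_eq_getLast?, hlast, Option.getD_some]
      have hcast : (c0 : Int) - 1 = ((c0 - 1 : Nat) : Int) := by omega
      rw [hlastD, if_pos (by omega : j ≥ 0), if_pos (by omega : (c0 : Int) ≠ 0),
        hcast, PySem.List.pop?_natCast free (c0 - 1) hc1]
      have hun : unsolds (sold.set j.toNat true) = free.eraseIdx (c0 - 1) := by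
        rw [unsolds_set sold j.toNat hjm.2.1]
        rw [show ((j.toNat : Nat) : Int) = j from Int.toNat_of_nonneg hjm.1]
        rw [← hfreedef, hjdef]
        exact sorted_filter_ne_eraseIdx hsort (c0 - 1) hc1
      rw [PySem.List.pySetD_of_nonneg sold true hjm.1,
        ih (sold.set j.toNat true) (by rw [List.length_set]; exact hlen), hun]

theorem theMostExpensiveGift_main (gifts : List Int) (customers : List Int) :
    theMostExpensiveGift gifts customers = theMostExpensiveGift_alt gifts customers := by
  unfold theMostExpensiveGift theMostExpensiveGift_alt
  rw [← unsolds_replicate gifts.length]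
  exact main_loop gifts customers (List.replicate gifts.length false) (by simp)

-- ===== VERDICT (by name: the statement is the Claim_ definition above) =====
theorem theMostExpensiveGift_spec : Claim_equal_theMostExpensiveGift := by
  intro gifts customers _
  exact theMostExpensiveGift_main gifts customers
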